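-- pv_equiv track=rewrite | github.com/sudo-boo/cs378-lab5 | Lab02/Submission/22B0910_22B0927_22B1036_22B1055_CS378_lab2/receiver-combined.py | flipBitsAt
-- ===== SOURCE A (Python) =====
-- def flipBitsAt(codeword, error_positions):
--     """
--     Flip bits at specified positions to simulate errors.
--     """
--     if not error_positions:
--         return codeword
--
--     error_positions = list(set(error_positions))
--     codeword = list(codeword)
--     for pos in error_positions:
--         if 0 <= pos < len(codeword):
--             codeword[pos] = '1' if codeword[pos] == '0' else '0'
--     return ''.join(codeword)
-- ===== SOURCE B (Python) =====
-- def flipBitsAt(codeword, error_positions):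
--     """
--     Flip bits at specified positions to simulate errors.
--     """
--     if not error_positions:
--         return codeword
--     positions = set(error_positions)
--     return ''.join(('1' if c == '0' else '0') if i in positions else c
--                    for i, c in enumerate(codeword))
-- ===== Notes on version B (the rewrite author's own statement) =====
-- stated objective: idiomatic
-- what changed: B scans the codeword once with enumerate and a set-membership test per index (gather), instead of A's scatter loop that converts the string to a list and writes flipped characters back at each deduplicated error position.
import Mathlib
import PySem

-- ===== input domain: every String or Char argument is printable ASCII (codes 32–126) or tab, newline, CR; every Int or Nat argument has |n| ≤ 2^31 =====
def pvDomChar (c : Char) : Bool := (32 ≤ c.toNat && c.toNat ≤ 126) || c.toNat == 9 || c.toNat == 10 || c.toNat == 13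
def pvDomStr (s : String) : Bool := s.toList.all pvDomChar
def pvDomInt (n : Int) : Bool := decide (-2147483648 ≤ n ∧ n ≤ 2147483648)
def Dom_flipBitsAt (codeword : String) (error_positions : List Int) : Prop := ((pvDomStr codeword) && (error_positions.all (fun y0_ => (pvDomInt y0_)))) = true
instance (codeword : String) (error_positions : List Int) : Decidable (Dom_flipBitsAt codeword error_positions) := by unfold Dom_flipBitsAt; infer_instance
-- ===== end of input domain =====

-- B replaces A's scatter loop (write flipped chars back at each deduplicated position)
-- by a single gather scan of the codeword with a set-membership test per index (idiomatic).

-- ===== PORT A =====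
-- one iteration of A's 'for pos in error_positions: if 0 <= pos < len: codeword[pos] = flip'
def flipAStep (cs : List Char) (pos : Int) : List Char :=
  if 0 ≤ pos ∧ pos < (cs.length : Int) then
    cs.set pos.toNat (if cs.getD pos.toNat ' ' = '0' then '1' else '0')
  else cs

def flipBitsAt (codeword : String) (error_positions : List Int) : String :=
  if error_positions = [] then codeword
  else
    String.ofList ((PySem.Set.ofList error_positions).foldl flipAStep codeword.toList)

-- ===== PORT B =====
def flipBitsAt_alt (codeword : String) (error_positions : List Int) : String :=
  if error_positions = [] then codeword
  else
    let positions := PySem.Set.ofList error_positions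
    String.ofList ((PySem.List.enumerate codeword.toList).map
      (fun ic => if ic.1 ∈ positions then (if ic.2 = '0' then '1' else '0') else ic.2))

-- ===== PRECONDITION & SPEC =====
def Spec_flipBitsAt (codeword : String) (error_positions : List Int) (out : String) : Prop := out = flipBitsAt_alt codeword error_positions
instance (codeword : String) (error_positions : List Int) (out : String) : Decidable (Spec_flipBitsAt codeword error_positions out) := by unfold Spec_flipBitsAt; infer_instance

-- ===== CLAIM (what is proved, stated in full; the proofs are below) =====
def Claim_equal_flipBitsAt : Prop := ∀ (codeword : String) (error_positions : List Int), Dom_flipBitsAt codeword error_positions → Spec_flipBitsAt codeword error_positions (flipBitsAt codeword error_positions)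

-- ===== LEMMAS AND PROOFS =====

theorem flipAStep_length (cs : List Char) (pos : Int) : (flipAStep cs pos).length = cs.length := by
  unfold flipAStep; split <;> simp

theorem foldA_length (ps : List Int) (l : List Char) :
    (ps.foldl flipAStep l).length = l.length := by
  induction ps generalizing l with
  | nil => rfl
  | cons p rest ih => simp [List.foldl, ih, flipAStep_length]

-- the value A's fold leaves at index k: l[k] flipped iff (k : Int) occurs in ps
theorem foldA_getElem (ps : List Int) (hnd : ps.Nodup) (l : List Char) (k : Nat)
    (hk : k < l.length) (hk' : k < (ps.foldl flipAStep l).length) :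
    (ps.foldl flipAStep l)[k] =
      (if (k : Int) ∈ ps then (if l[k] = '0' then '1' else '0') else l[k]) := by
  induction ps generalizing l with
  | nil => simp
  | cons p rest ih =>
    simp only [List.foldl_cons]
    have hlen : (flipAStep l p).length = l.length := flipAStep_length l p
    have hnd' : rest.Nodup := hnd.of_cons
    have hk2 : k < (flipAStep l p).length := by omega
    have hk3 : k < (rest.foldl flipAStep (flipAStep l p)).length := by
      rw [foldA_length]; omega
    rw [ih hnd' (flipAStep l p) hk2 hk3]
    by_cases hkp : (k : Int) = p
    · -- p is exactly index k, in range; p does not recur in rest (nodup)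
      have hpnotrest : (k : Int) ∉ rest := by
        rw [hkp]; exact (List.nodup_cons.mp hnd).1
      have hrange : 0 ≤ p ∧ p < (l.length : Int) := by
        constructor <;> omega
      have hpk : p.toNat = k := by omega
      simp only [flipAStep, hrange, and_self, if_true, hpk]
      have hget : l.getD k ' ' = l[k] := List.getD_eq_getElem l ' ' hk
      simp only [List.getElem_set]
      rw [if_neg (hkp ▸ hpnotrest)]
      simp only [List.getElem?_eq_getElem hk, List.getD_eq_getElem?_getD]
      simp [List.mem_cons, hkp]
    · -- index k untouched by this step
      have hmem : ((k : Int) ∈ p :: rest) ↔ ((k : Int) ∈ rest) := by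
        simp [List.mem_cons, hkp]
      have hsame : (flipAStep l p)[k]'hk2 = l[k] := by
        unfold flipAStep
        split
        · next h =>
          have : p.toNat ≠ k := by omega
          simp [this]
        · rfl
      rw [hsame]; simp [List.mem_cons, hkp]

theorem foldA_eq_map (ps : List Int) (hnd : ps.Nodup) (l : List Char) :
    ps.foldl flipAStep l =
      (PySem.List.enumerate l).map
        (fun ic => if ic.1 ∈ ps then (if ic.2 = '0' then '1' else '0') else ic.2) := by
  apply List.ext_getElem
  · simp [foldA_length, PySem.List.length_enumerate]
  · intro k h1 h2
    have hk : k < l.length := by rwa [foldA_length] at h1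
    rw [foldA_getElem ps hnd l k hk h1]
    have hke : k < (PySem.List.enumerate l 0).length := by
      rwa [PySem.List.length_enumerate]
    simp [PySem.List.getElem_enumerate]

theorem flipBitsAt_spec_aux (codeword : String) (error_positions : List Int) :
    flipBitsAt codeword error_positions = flipBitsAt_alt codeword error_positions := by
  unfold flipBitsAt flipBitsAt_alt
  split
  · rfl
  · exact congrArg String.ofList
      (foldA_eq_map _ (PySem.Set.nodup_ofList error_positions) codeword.toList)

-- ===== VERDICT (by name: the statement is the Claim_ definition above) =====
theorem flipBitsAt_spec : Claim_equal_flipBitsAt := by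
  intro codeword error_positions _
  exact flipBitsAt_spec_aux codeword error_positions
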